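-- pv_equiv track=rewrite | github.com/mfou/graphmlconverter | graphml2mermaid.py | _merge_styles
-- ===== SOURCE A (Python) =====
-- from typing import Dict, List, Any, Tuple
--
-- def _merge_styles(style_dict: Dict[str, Dict[str, str]], default_fill: str = '#ffffff', default_stroke: str = '#ccc') -> str:
--     """
--     Merge multiple style properties into a single classDef string.
--     Averages colors if multiple styles exist.
--
--     Args:
--         style_dict: Dict mapping id -> {property: value}
--         default_fill: Default fill color if none specified
--         default_stroke: Default stroke color if none specified
--
--     Returns:
--         Mermaid classDef style string
--     """
--     if not style_dict:
--         return f'fill:{default_fill},stroke:{default_stroke},stroke-width:1px'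
--
--     # Collect all properties
--     all_properties = {}
--     for style_props in style_dict.values():
--         for prop, value in style_props.items():
--             if prop not in all_properties:
--                 all_properties[prop] = []
--             all_properties[prop].append(value)
--
--     # Build merged style string with first value of each property
--     style_parts = []
--
--     if 'fill' in all_properties:
--         style_parts.append(f"fill:{all_properties['fill'][0]}")
--     else:
--         style_parts.append(f"fill:{default_fill}")
--
--     if 'stroke' in all_properties:
--         style_parts.append(f"stroke:{all_properties['stroke'][0]}")
--     else:
--         style_parts.append(f"stroke:{default_stroke}")
--
--     if 'stroke-width' in all_properties:
--         style_parts.append(f"stroke-width:{all_properties['stroke-width'][0]}")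
--     else:
--         style_parts.append("stroke-width:1px")
--
--     if 'stroke-dasharray' in all_properties:
--         style_parts.append(f"stroke-dasharray:{all_properties['stroke-dasharray'][0]}")
--
--     if 'font-size' in all_properties:
--         style_parts.append(f"font-size:{all_properties['font-size'][0]}")
--
--     if 'color' in all_properties:
--         style_parts.append(f"color:{all_properties['color'][0]}")
--
--     return ','.join(style_parts)
-- ===== SOURCE B (Python) =====
-- def _merge_styles(style_dict, default_fill='#ffffff', default_stroke='#ccc'):
--     if not style_dict:
--         return f'fill:{default_fill},stroke:{default_stroke},stroke-width:1px'
--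
--     def first_value(prop):
--         # first occurrence of prop across styles, in iteration order; None = absent
--         for props in style_dict.values():
--             if prop in props:
--                 return props[prop]
--         return None
--
--     fill = first_value('fill')
--     stroke = first_value('stroke')
--     width = first_value('stroke-width')
--     parts = [
--         f"fill:{fill if fill is not None else default_fill}",
--         f"stroke:{stroke if stroke is not None else default_stroke}",
--         f"stroke-width:{width if width is not None else '1px'}",
--     ]
--     for prop in ('stroke-dasharray', 'font-size', 'color'):
--         v = first_value(prop)
--         if v is not None:
--             parts.append(f"{prop}:{v}")
--     return ','.join(parts)
-- ===== Notes on version B (the rewrite author's own statement) =====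
-- stated objective: simpler
-- what changed: Drops the all_properties grouping index entirely: instead of building a dict of value lists over all styles and taking each list's head, B scans the styles once per property with a first_value helper that returns the first present value (None as a true absence sentinel), so no intermediate dict of lists is ever built.
import Mathlib
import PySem

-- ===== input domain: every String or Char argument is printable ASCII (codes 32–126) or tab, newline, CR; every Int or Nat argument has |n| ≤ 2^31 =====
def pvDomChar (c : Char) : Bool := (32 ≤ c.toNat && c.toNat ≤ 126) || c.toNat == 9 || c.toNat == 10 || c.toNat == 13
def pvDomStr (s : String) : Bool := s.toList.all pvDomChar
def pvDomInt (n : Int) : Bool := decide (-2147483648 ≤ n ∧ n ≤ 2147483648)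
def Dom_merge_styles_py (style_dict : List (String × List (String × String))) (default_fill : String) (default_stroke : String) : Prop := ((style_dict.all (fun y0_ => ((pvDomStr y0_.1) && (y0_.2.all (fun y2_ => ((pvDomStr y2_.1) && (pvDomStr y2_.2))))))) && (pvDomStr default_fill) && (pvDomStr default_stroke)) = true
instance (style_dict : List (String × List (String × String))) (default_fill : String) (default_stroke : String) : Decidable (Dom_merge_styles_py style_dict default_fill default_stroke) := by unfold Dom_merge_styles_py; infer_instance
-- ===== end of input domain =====

-- B drops A's all_properties index of value lists and instead scans the styles once per
-- property for the first present value (objective: simpler; no intermediate dict of lists).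

-- ===== PORT A =====
-- the all_properties loop: d[prop] = d.get(prop, []) + [value] (setdefault-then-append pattern)
def pvBuildAll (vals : List (List (String × String))) : PySem.Dict String (List String) :=
  vals.foldl
    (fun d props => props.foldl (fun d pv => d.modify pv.1 [] (fun l => l ++ [pv.2])) d)
    PySem.Dict.empty

def merge_styles_py (style_dict : List (String × List (String × String))) (default_fill : String) (default_stroke : String) : String :=
  if style_dict = [] then
    "fill:" ++ default_fill ++ ",stroke:" ++ default_stroke ++ ",stroke-width:1px"
  else
    let all_properties := pvBuildAll (style_dict.map (·.2))
    -- all_properties[p][0]: the value list is nonempty whenever the key is present,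
    -- so '.headD ""' is exact under the 'contains' guard
    let p1 := if all_properties.contains "fill" then
        "fill:" ++ (all_properties.getD "fill" []).headD ""
      else "fill:" ++ default_fill
    let p2 := if all_properties.contains "stroke" then
        "stroke:" ++ (all_properties.getD "stroke" []).headD ""
      else "stroke:" ++ default_stroke
    let p3 := if all_properties.contains "stroke-width" then
        "stroke-width:" ++ (all_properties.getD "stroke-width" []).headD ""
      else "stroke-width:1px"
    let style_parts := [p1, p2, p3]
    let style_parts := if all_properties.contains "stroke-dasharray" then
        style_parts ++ ["stroke-dasharray:" ++ (all_properties.getD "stroke-dasharray" []).headD ""]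
      else style_parts
    let style_parts := if all_properties.contains "font-size" then
        style_parts ++ ["font-size:" ++ (all_properties.getD "font-size" []).headD ""]
      else style_parts
    let style_parts := if all_properties.contains "color" then
        style_parts ++ ["color:" ++ (all_properties.getD "color" []).headD ""]
      else style_parts
    PySem.Str.join "," style_parts

-- ===== PORT B =====
-- first_value(prop): first style (in order) whose dict contains prop; none = absent
def pvFirstVal (p : String) : List (String × List (String × String)) → Option String
  | [] => none
  | (_, props) :: rest =>
    match props.find? (fun kv => kv.1 == p) with
    | some kv => some kv.2
    | none => pvFirstVal p rest

def merge_styles_py_alt (style_dict : List (String × List (String × String))) (default_fill : String) (default_stroke : String) : String :=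
  if style_dict = [] then
    "fill:" ++ default_fill ++ ",stroke:" ++ default_stroke ++ ",stroke-width:1px"
  else
    let opt := fun (p : String) =>
      match pvFirstVal p style_dict with
      | some v => [p ++ ":" ++ v]
      | none => []
    PySem.Str.join ","
      (["fill:" ++ (pvFirstVal "fill" style_dict).getD default_fill,
        "stroke:" ++ (pvFirstVal "stroke" style_dict).getD default_stroke,
        "stroke-width:" ++ (pvFirstVal "stroke-width" style_dict).getD "1px"]
       ++ opt "stroke-dasharray" ++ opt "font-size" ++ opt "color")

-- ===== PRECONDITION & SPEC =====
def Spec_merge_styles_py (style_dict : List (String × List (String × String))) (default_fill : String) (default_stroke : String) (out : String) : Prop := out = merge_styles_py_alt style_dict default_fill default_stroke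
instance (style_dict : List (String × List (String × String))) (default_fill : String) (default_stroke : String) (out : String) : Decidable (Spec_merge_styles_py style_dict default_fill default_stroke out) := by unfold Spec_merge_styles_py; infer_instance

-- ===== CLAIM (what is proved, stated in full; the proofs are below) =====
def Claim_equal_merge_styles_py : Prop := ∀ (style_dict : List (String × List (String × String))) (default_fill : String) (default_stroke : String), Dom_merge_styles_py style_dict default_fill default_stroke → Spec_merge_styles_py style_dict default_fill default_stroke (merge_styles_py style_dict default_fill default_stroke)

-- ===== LEMMAS AND PROOFS =====

-- the flattened property/value pairs, in A's (and B's) visiting order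
def pvPairs (sd : List (String × List (String × String))) : List (String × String) :=
  sd.flatMap (·.2)

theorem pvBuildAll_getD (p : String) (vals : List (List (String × String))) (d : PySem.Dict String (List String)) :
    (vals.foldl (fun d props => props.foldl (fun d pv => d.modify pv.1 [] (fun l => l ++ [pv.2])) d) d).getD p []
      = d.getD p [] ++ ((vals.flatMap id).filter (fun kv => kv.1 == p)).map (·.2) := by
  induction vals generalizing d with
  | nil => simp
  | cons v rest ih =>
    simp only [List.foldl_cons, List.flatMap_cons, id, List.filter_append, List.map_append]
    rw [ih, PySem.Dict.getD_foldl_modify_append, List.append_assoc]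

theorem pvBuildAll_keys (vals : List (List (String × String))) (d : PySem.Dict String (List String)) :
    (vals.foldl (fun d props => props.foldl (fun d pv => d.modify pv.1 [] (fun l => l ++ [pv.2])) d) d).keys
      = PySem.Set.update d.keys ((vals.flatMap id).map (·.1)) := by
  induction vals generalizing d with
  | nil => simp [PySem.Set.update]
  | cons v rest ih =>
    simp only [List.foldl_cons, List.flatMap_cons, id, List.map_append]
    rw [ih, PySem.Dict.keys_foldl_modify_key v (fun pv => pv.1) ([] : List String) (fun _ pv l => l ++ [pv.2]) d,
      PySem.Set.update_append]

theorem pvBuildAll_contains (p : String) (sd : List (String × List (String × String))) :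
    (pvBuildAll (sd.map (·.2))).contains p
      = !((pvPairs sd).filter (fun kv => kv.1 == p)).isEmpty := by
  have hk := pvBuildAll_keys (sd.map (·.2)) PySem.Dict.empty
  have hmem : p ∈ (pvBuildAll (sd.map (·.2))).keys ↔ p ∈ ((sd.map (·.2)).flatMap id).map (·.1) := by
    rw [pvBuildAll]
    rw [hk]
    simp [PySem.Set.mem_update, PySem.Dict.keys_empty]
  have hflat : ((sd.map (·.2)).flatMap id) = pvPairs sd := by
    simp [pvPairs, List.flatMap_map]
  cases hfl : (pvPairs sd).filter (fun kv => kv.1 == p) with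
  | nil =>
    simp only [List.isEmpty_nil, Bool.not_true]
    rw [Bool.eq_false_iff]
    intro hc
    rw [PySem.Dict.contains_iff_mem_keys] at hc
    rw [hmem, hflat] at hc
    obtain ⟨kv, hkv, rfl⟩ := List.mem_map.mp hc
    have : kv ∈ (pvPairs sd).filter (fun kv' => kv'.1 == kv.1) :=
      List.mem_filter.mpr ⟨hkv, by simp⟩
    simp [hfl] at this
  | cons a as =>
    simp only [List.isEmpty_cons, Bool.not_false]
    have hkv : a ∈ (pvPairs sd).filter (fun kv => kv.1 == p) := by
      rw [hfl]; exact List.mem_cons_self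
    have := List.mem_filter.mp hkv
    rw [PySem.Dict.contains_iff_mem_keys, hmem, hflat]
    exact List.mem_map.mpr ⟨a, this.1, by have := this.2; simpa using this.symm⟩

theorem pvFirstVal_eq (p : String) (sd : List (String × List (String × String))) :
    pvFirstVal p sd = (((pvPairs sd).filter (fun kv => kv.1 == p)).map (·.2)).head? := by
  induction sd with
  | nil => simp [pvFirstVal, pvPairs]
  | cons e rest ih =>
    obtain ⟨k, props⟩ := e
    simp only [pvFirstVal, pvPairs, List.flatMap_cons, List.filter_append, List.map_append]
    cases hf : props.find? (fun kv => kv.1 == p) with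
    | none =>
      have hnil : props.filter (fun kv => kv.1 == p) = [] := by
        rw [List.filter_eq_nil_iff]
        intro a ha
        exact (by simpa using List.find?_eq_none.mp hf a ha)
      rw [ih, hnil]
      simp [pvPairs]
    | some kv =>
      have : (props.filter (fun kv => kv.1 == p)).head? = some kv := by
        rw [List.head?_filter]
        exact hf
      cases hfl : props.filter (fun kv => kv.1 == p) with
      | nil => rw [hfl] at this; simp at this
      | cons a as =>
        rw [hfl] at this
        simp only [List.head?_cons, Option.some.injEq] at this
        subst this
        simp

-- one required property: A's contains/getD branch equals B's first-value-with-default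
theorem pvReq (p dflt pre : String) (sd : List (String × List (String × String))) :
    (if (pvBuildAll (sd.map (·.2))).contains p then
        pre ++ ((pvBuildAll (sd.map (·.2))).getD p []).headD ""
      else pre ++ dflt)
      = pre ++ (pvFirstVal p sd).getD dflt := by
  rw [pvFirstVal_eq]
  have hg : (pvBuildAll (sd.map (·.2))).getD p []
      = ((pvPairs sd).filter (fun kv => kv.1 == p)).map (·.2) := by
    rw [pvBuildAll, pvBuildAll_getD]
    simp [pvPairs, List.flatMap_map]
  cases hfl : (pvPairs sd).filter (fun kv => kv.1 == p) with
  | nil =>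
    have hc : (pvBuildAll (sd.map (·.2))).contains p = false := by
      rw [pvBuildAll_contains, hfl]; simp
    simp [hc]
  | cons a as =>
    have hc : (pvBuildAll (sd.map (·.2))).contains p = true := by
      rw [pvBuildAll_contains, hfl]; simp
    simp [hc, hg, hfl]

-- one optional property: A's conditional append equals B's opt-list
theorem pvOpt (p pre : String) (hpre : pre = p ++ ":") (sd : List (String × List (String × String))) :
    (if (pvBuildAll (sd.map (·.2))).contains p then
        [pre ++ ((pvBuildAll (sd.map (·.2))).getD p []).headD ""]
      else ([] : List String))
      = (match pvFirstVal p sd with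
         | some v => [p ++ ":" ++ v]
         | none => ([] : List String)) := by
  subst hpre
  rw [pvFirstVal_eq]
  have hg : (pvBuildAll (sd.map (·.2))).getD p []
      = ((pvPairs sd).filter (fun kv => kv.1 == p)).map (·.2) := by
    rw [pvBuildAll, pvBuildAll_getD]
    simp [pvPairs, List.flatMap_map]
  cases hfl : (pvPairs sd).filter (fun kv => kv.1 == p) with
  | nil =>
    have hc : (pvBuildAll (sd.map (·.2))).contains p = false := by
      rw [pvBuildAll_contains, hfl]; simp
    simp [hc]
  | cons a as =>
    have hc : (pvBuildAll (sd.map (·.2))).contains p = true := by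
      rw [pvBuildAll_contains, hfl]; simp
    simp [hc, hg, hfl]

-- ===== VERDICT (by name: the statement is the Claim_ definition above) =====
theorem merge_styles_py_spec : Claim_equal_merge_styles_py := by
  intro sd df ds _
  unfold Spec_merge_styles_py merge_styles_py merge_styles_py_alt
  by_cases h : sd = []
  · simp [h]
  · simp only [h, if_false]
    have e1 := pvReq "fill" df "fill:" sd
    have e2 := pvReq "stroke" ds "stroke:" sd
    have e3 := pvReq "stroke-width" "1px" "stroke-width:" sd
    have hlit : ("stroke-width:1px" : String) = "stroke-width:" ++ "1px" := rfl
    have e4 := pvOpt "stroke-dasharray" "stroke-dasharray:" rfl sd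
    have e5 := pvOpt "font-size" "font-size:" rfl sd
    have e6 := pvOpt "color" "color:" rfl sd
    -- turn A's conditional appends into appends of conditional segments
    have hsplit : ∀ (parts : List String) (c : Bool) (x : String),
        (if c then parts ++ [x] else parts) = parts ++ (if c then [x] else []) := by
      intro parts c x; cases c <;> simp
    rw [hsplit, hsplit, hsplit, e4, e5, e6, hlit, e1, e2, e3]
    try simp [List.append_assoc]
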